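-- pv_equiv track=rewrite | github.com/koseiohara/CatPDF | src/w2tex.py | alph_update
-- ===== SOURCE A (Python) =====
-- def alph_update(curr, offset):
--     curr = list(curr)
--     nstr = len(curr)
--     for i in range(nstr):
--         if (curr[nstr-i-1] != 'z'):
--             curr[nstr-i-1] = chr(ord(curr[nstr-i-1]) + offset)
--             curr[nstr-i:] = ['a']*i
--             return ''.join(curr)
--
--     raise ValueError('Too many input files')
-- ===== SOURCE B (Python) =====
-- def alph_update(curr, offset):
--     # Recursive carry: if the last char is not 'z' bump it and stop;
--     # otherwise recurse on the string without its last char and append 'a'.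
--     if not curr:
--         raise ValueError('Too many input files')
--     if curr[-1] != 'z':
--         return curr[:-1] + chr(ord(curr[-1]) + offset)
--     return alph_update(curr[:-1], offset) + 'a'
-- ===== Notes on version B (the rewrite author's own statement) =====
-- stated objective: alternative
-- what changed: Replaced A's index loop that mutates a char list in place and builds the whole result at the stopping position by a structural recursion on the string: each level handles only the last character, carries by recursing on curr[:-1], and appends its own 'a' on the way back out.
import Mathlib
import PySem

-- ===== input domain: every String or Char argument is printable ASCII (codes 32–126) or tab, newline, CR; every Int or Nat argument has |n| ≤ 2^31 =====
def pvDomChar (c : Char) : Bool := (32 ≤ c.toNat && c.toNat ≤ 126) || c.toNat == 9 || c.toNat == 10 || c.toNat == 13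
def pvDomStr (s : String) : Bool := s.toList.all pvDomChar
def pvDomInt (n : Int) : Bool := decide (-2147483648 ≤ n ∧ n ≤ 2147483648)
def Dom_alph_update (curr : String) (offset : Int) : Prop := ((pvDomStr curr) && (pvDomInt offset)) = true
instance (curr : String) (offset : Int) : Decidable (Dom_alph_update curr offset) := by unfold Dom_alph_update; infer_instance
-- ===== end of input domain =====

-- B replaces A's index loop with in-place list mutation by a structural recursion on the string
-- (bump the last char, or recurse on curr[:-1] and append 'a'); equal return value on Pre_.

-- chr(ord(c) + offset), computed verbatim by both Pythons
def pvChr (c : Char) (offset : Int) : Char := Char.ofNat ((c.toNat : Int) + offset).toNat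

-- ===== PORT A =====
-- the for-loop over i in range(nstr), scanning from the right; "" stands for the ValueError path (outside Pre_)
def alphLoopA (cs : List Char) (offset : Int) (n i : Nat) : String :=
  if _h : i < n then
    if cs.getD (n - i - 1) ' ' ≠ 'z' then
      -- curr[nstr-i-1] = chr(...); curr[nstr-i:] = ['a']*i; return ''.join(curr)
      String.ofList (cs.take (n - i - 1) ++ [pvChr (cs.getD (n - i - 1) ' ') offset] ++ List.replicate i 'a')
    else
      alphLoopA cs offset n (i + 1)
  else ""
termination_by n - i

def alph_update (curr : String) (offset : Int) : String :=
  let cs := curr.toList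
  alphLoopA cs offset cs.length 0

-- ===== PORT B =====
-- Source B recurses on the last character (curr[-1], curr[:-1]); ported as recursion on the
-- reversed char list, whose head is the last character. "" stands for the ValueError path.
def altRec (rs : List Char) (offset : Int) : String :=
  match rs with
  | [] => ""  -- raise ValueError (outside Pre_; in Python the exception propagates)
  | c :: t =>
    if c ≠ 'z' then String.ofList (t.reverse ++ [pvChr c offset])   -- curr[:-1] + chr(ord(curr[-1]) + offset)
    else altRec t offset ++ "a"                                 -- alph_update(curr[:-1], offset) + 'a'

def alph_update_alt (curr : String) (offset : Int) : String :=
  altRec curr.toList.reverse offset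

-- ===== PRECONDITION & SPEC =====
-- Pre_ excludes exactly the inputs where A raises ValueError (empty or all-'z' string, or chr() argument
-- out of range), plus the inputs where chr yields a lone surrogate: there A returns a one-off Python str
-- that is not representable as a Lean String (not a value of the declared type).
def Pre_alph_update (curr : String) (offset : Int) : Prop :=
  curr.toList.any (· ≠ 'z') = true ∧
  (let v := ((curr.toList.reverse.dropWhile (· == 'z')).head!.toNat : Int) + offset
   0 ≤ v ∧ v < 1114112 ∧ ¬ (55296 ≤ v ∧ v < 57344))
instance (curr : String) (offset : Int) : Decidable (Pre_alph_update curr offset) := by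
  unfold Pre_alph_update; infer_instance

def pvWitness_alph_update : String × Int := ("ab", 1)

def Spec_alph_update (curr : String) (offset : Int) (out : String) : Prop := out = alph_update_alt curr offset
instance (curr : String) (offset : Int) (out : String) : Decidable (Spec_alph_update curr offset out) := by unfold Spec_alph_update; infer_instance

-- ===== CLAIM (what is proved, stated in full; the proofs are below) =====
def Claim_equal_alph_update : Prop := ∀ (curr : String) (offset : Int), Dom_alph_update curr offset → Pre_alph_update curr offset → Spec_alph_update curr offset (alph_update curr offset)

-- ===== LEMMAS AND PROOFS =====

-- A's loop, as a recursion on the reversed string (i counts the 'z's already passed)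
def pvScan (rs : List Char) (offset : Int) (i : Nat) : String :=
  match rs with
  | [] => ""
  | c :: t =>
    if c ≠ 'z' then String.ofList (t.reverse ++ [pvChr c offset] ++ List.replicate i 'a')
    else pvScan t offset (i + 1)

theorem alphLoopA_eq_pvScan (cs : List Char) (offset : Int) :
    ∀ i, alphLoopA cs offset cs.length i = pvScan ((cs.take (cs.length - i)).reverse) offset i := by
  intro i
  induction' hfuel : cs.length - i using Nat.strong_induction_on with fuel ih generalizing i
  subst hfuel
  rw [alphLoopA]
  by_cases h : i < cs.length
  · have hm : cs.length - i = (cs.length - i - 1) + 1 := by omega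
    set m := cs.length - i - 1 with hmdef
    have hmlt : m < cs.length := by omega
    have htake : cs.take (cs.length - i) = cs.take m ++ [cs.getD m ' '] := by
      rw [hm, List.take_add_one]
      simp [List.getElem?_eq_getElem hmlt, List.getD_eq_getElem cs ' ' hmlt]
    rw [htake]
    simp only [List.reverse_append, List.reverse_singleton, List.singleton_append, pvScan,
      List.reverse_reverse, dif_pos h]
    split_ifs with hz
    · rfl
    · have hm2 : cs.length - (i + 1) = m := by omega
      rw [ih (cs.length - (i + 1)) (by omega) (i + 1) rfl, hm2]
  · have h0 : cs.length - i = 0 := by omega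
    simp [h0, pvScan, dif_neg h]

theorem pvScan_eq_altRec (offset : Int) :
    ∀ (rs : List Char) (i : Nat), rs.any (· ≠ 'z') = true →
      pvScan rs offset i = String.ofList ((altRec rs offset).toList ++ List.replicate i 'a') := by
  intro rs
  induction rs with
  | nil => intro i h; simp at h
  | cons c t ih =>
    intro i h
    by_cases hz : c = 'z'
    · have ht : t.any (· ≠ 'z') = true := by
        rcases List.any_eq_true.mp h with ⟨x, hx, hxz⟩
        rcases List.mem_cons.mp hx with hx | hx
        · rw [hx, hz] at hxz; simp at hxz
        · exact List.any_eq_true.mpr ⟨x, hx, hxz⟩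
      have h1 : pvScan (c :: t) offset i = pvScan t offset (i + 1) := by simp [pvScan, hz]
      have h2 : altRec (c :: t) offset = altRec t offset ++ "a" := by simp [altRec, hz]
      rw [h1, ih (i + 1) ht, h2]
      apply congrArg String.ofList
      simp [String.toList_append, String.toList_ofList, List.replicate_succ]
    · simp [pvScan, altRec, hz, String.toList_ofList]

-- ===== VERDICT (by name: the statement is the Claim_ definition above) =====
theorem alph_update_spec : Claim_equal_alph_update := by
  intro curr offset _hdom hpre
  obtain ⟨hany, -⟩ := hpre
  unfold Spec_alph_update alph_update alph_update_alt
  have hanyr : curr.toList.reverse.any (· ≠ 'z') = true := by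
    rcases List.any_eq_true.mp hany with ⟨x, hx, hxz⟩
    exact List.any_eq_true.mpr ⟨x, List.mem_reverse.mpr hx, hxz⟩
  rw [alphLoopA_eq_pvScan curr.toList offset 0]
  simp only [Nat.sub_zero, List.take_length]
  rw [pvScan_eq_altRec offset curr.toList.reverse 0 hanyr]
  simp only [List.replicate_zero, List.append_nil]
  exact String.ofList_toList
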